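-- pv_equiv track=rewrite | github.com/jalmx/geneate_table_exm | src/gtable.py | _clear_questions
-- ===== SOURCE A (Python) =====
-- def _clear_questions(txt) -> str:
--     content_raw = txt.replace("\t", "").split("\n")
--     content_pre = []
--
--     for line in content_raw:
--         if len(line) > 0:
--             content_pre.append(line.strip())
--
--     start = False
--     content = []
--     for line in content_pre:
--         if str(line)[0].isdigit() or start:
--             start = True
--             content.append(line)
--
--     return content
-- ===== SOURCE B (Python) =====
-- def _clear_questions(txt) -> str:
--     lines = [l.strip() for l in txt.replace("\t", "").split("\n") if len(l) > 0]
--     for i, l in enumerate(lines):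
--         if l[0].isdigit():
--             return lines[i:]
--     return []
-- ===== Notes on version B (the rewrite author's own statement) =====
-- stated objective: idiomatic
-- what changed: Replaces the boolean start-flag threaded through a second accumulating loop by a comprehension that builds the cleaned lines once and an index scan that returns the tail slice from the first digit-leading line; the tail lines are never re-checked.
-- crash fix: On inputs whose cleaned line list contains an empty (whitespace-only) line at or after the first digit-leading line, A raises IndexError by re-reading line[0] even after collection has started, while B returns the tail slice including that empty line. — e.g. on _clear_questions("1\n "): A raises IndexError, B returns ["1", ""]
import Mathlib
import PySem

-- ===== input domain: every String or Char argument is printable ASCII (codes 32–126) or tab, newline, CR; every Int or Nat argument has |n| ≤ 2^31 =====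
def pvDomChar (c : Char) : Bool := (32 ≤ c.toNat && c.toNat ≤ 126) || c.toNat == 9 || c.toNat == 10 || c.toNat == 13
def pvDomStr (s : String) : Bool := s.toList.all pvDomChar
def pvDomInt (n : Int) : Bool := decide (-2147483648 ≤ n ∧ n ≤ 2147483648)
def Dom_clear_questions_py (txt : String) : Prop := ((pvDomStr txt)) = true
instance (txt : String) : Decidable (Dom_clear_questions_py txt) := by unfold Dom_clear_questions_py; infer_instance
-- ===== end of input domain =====

-- B replaces A's boolean start-flag loop by building the cleaned lines once and returning the
-- tail slice from the first digit-leading line (idiomatic; tail lines are never re-checked,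
-- so B returns where A raises on an empty stripped line after the first digit line).

-- line[0].isdigit() with Python's IndexError on "" mapped to `false` (those inputs are outside Pre_)
def pvDigit0 (l : String) : Bool := ((PySem.Str.pyGet? l 0).map PySem.Chars.isdigit).getD false

-- ===== PORT A =====
def clear_questions_py (txt : String) : List String :=
  let content_raw := (PySem.Str.split? (PySem.Str.replace txt "\t" "") "\n").getD []
  let content_pre := content_raw.foldl
    (fun acc line => if PySem.Str.len line > 0 then acc ++ [PySem.Str.strip line] else acc) []
  let r := content_pre.foldl
    (fun (st : Bool × List String) line =>
      if pvDigit0 line || st.1 then (true, st.2 ++ [line]) else st)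
    (false, [])
  r.2

-- ===== PORT B =====
-- the `for i, l in enumerate(lines): if l[0].isdigit(): return lines[i:]` scan
def pvScanB : List String → List String
  | [] => []
  | l :: rest => if pvDigit0 l then l :: rest else pvScanB rest

def clear_questions_py_alt (txt : String) : List String :=
  let lines := (((PySem.Str.split? (PySem.Str.replace txt "\t" "") "\n").getD []).filter
      (fun l => PySem.Str.len l > 0)).map PySem.Str.strip
  pvScanB lines

-- ===== PRECONDITION & SPEC =====
-- the cleaned (tab-stripped, split, nonempty-filtered, stripped) lines of txt
def pvLines (txt : String) : List String :=
  (((PySem.Str.split? (PySem.Str.replace txt "\t" "") "\n").getD []).filter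
      (fun l => PySem.Str.len l > 0)).map PySem.Str.strip

-- Pre_ excludes exactly the inputs where Python A raises IndexError: a whitespace-only line
-- (empty after strip), whose first character A unconditionally reads.
def Pre_clear_questions_py (txt : String) : Prop := "" ∉ pvLines txt
instance (txt : String) : Decidable (Pre_clear_questions_py txt) := by unfold Pre_clear_questions_py; infer_instance

def pvWitness_clear_questions_py : String := ("1. one\na\n2. two")

-- A raises IndexError on any empty stripped line, even after the digit-leading line that starts
-- collection; when every line before the first digit-leading line is nonempty, B never reads the
-- offending line's first character and returns the tail.
def Raises_clear_questions_py (txt : String) : Prop :=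
  "" ∈ pvLines txt ∧ "" ∉ (pvLines txt).takeWhile (fun l => !pvDigit0 l)
instance (txt : String) : Decidable (Raises_clear_questions_py txt) := by unfold Raises_clear_questions_py; infer_instance
def pvRaiseWitness_clear_questions_py : String := ("1\n ")
def pvRaiseWitnessOut_clear_questions_py : List String := ["1", ""]

def Spec_clear_questions_py (txt : String) (out : List String) : Prop := out = clear_questions_py_alt txt
instance (txt : String) (out : List String) : Decidable (Spec_clear_questions_py txt out) := by unfold Spec_clear_questions_py; infer_instance

-- ===== CLAIM (what is proved, stated in full; the proofs are below) =====
def Claim_equal_clear_questions_py : Prop := ∀ (txt : String), Dom_clear_questions_py txt → Pre_clear_questions_py txt → Spec_clear_questions_py txt (clear_questions_py txt)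
def Claim_raises_clear_questions_py : Prop := (∀ (txt : String), Dom_clear_questions_py txt → Raises_clear_questions_py txt → ¬ Pre_clear_questions_py txt) ∧ (Dom_clear_questions_py (pvRaiseWitness_clear_questions_py) ∧ Raises_clear_questions_py (pvRaiseWitness_clear_questions_py) ∧ clear_questions_py_alt (pvRaiseWitness_clear_questions_py) = pvRaiseWitnessOut_clear_questions_py)

-- ===== LEMMAS AND PROOFS =====

-- once `start` is true, A's loop appends every remaining line
lemma pvLoopTrue (l : List String) (c : List String) :
    l.foldl (fun (st : Bool × List String) line =>
        if pvDigit0 line || st.1 then (true, st.2 ++ [line]) else st) (true, c)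
      = (true, c ++ l) := by
  induction l generalizing c with
  | nil => simp
  | cons x xs ih =>
    simp only [List.foldl_cons]
    rw [if_pos (by simp), ih]
    simp

-- before `start` is true, A's loop is B's scan
lemma pvLoopFalse (l : List String) :
    (l.foldl (fun (st : Bool × List String) line =>
        if pvDigit0 line || st.1 then (true, st.2 ++ [line]) else st) (false, [])).2
      = pvScanB l := by
  induction l with
  | nil => rfl
  | cons x xs ih =>
    by_cases h : pvDigit0 x = true
    · simp only [List.foldl_cons]
      rw [if_pos (by simp [h]), pvLoopTrue]
      simp [pvScanB, h]
    · simp only [List.foldl_cons]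
      rw [if_neg (by simp [h])]
      simp only [ih, pvScanB]
      rw [if_neg (by simp [h])]

-- ===== VERDICT (by name: the statement is the Claim_ definition above) =====
theorem clear_questions_py_spec : Claim_equal_clear_questions_py := by
  intro txt _ _
  show clear_questions_py txt = clear_questions_py_alt txt
  simp only [clear_questions_py, clear_questions_py_alt, pvLoopFalse]
  congr 1
  have hfun : (fun (acc : List String) line =>
        if PySem.Str.len line > 0 then acc ++ [PySem.Str.strip line] else acc)
      = (fun acc line => if (fun l => decide (PySem.Str.len l > 0)) line = true
          then acc ++ [PySem.Str.strip line] else acc) := by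
    funext acc line; split_ifs with h1 h2 <;> simp_all
  rw [hfun, PySem.List.foldl_append_if, List.nil_append]

@[simp] theorem clear_questions_py_raises : Claim_raises_clear_questions_py := by
  unfold Claim_raises_clear_questions_py
  refine ⟨fun txt _ hr hp => hp hr.1, by decide⟩
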